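-- pv_equiv track=rewrite | github.com/suixin233/OJ | suanfa_ouchuan.py | ouchuan
-- ===== SOURCE A (Python) =====
-- def ouchuan(sample):
--     sample.pop()
--     if len(sample) % 2 == 1:
--         sample.pop()
--     start = int(len(sample)/2) - 1
--     end = len(sample) - 1
--     while start >= 0:
--         if sample[start] == sample[end]:
--             start -= 1
--             end -= 1
--         else:
--             sample = sample[:-2]
--             start = int(len(sample) / 2) - 1
--             end = len(sample) - 1
--     return len(sample)
-- ===== SOURCE B (Python) =====
-- def ouchuan(sample):
--     # B: single ascending pass over half-lengths, keeping the largest k whose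
--     # prefix halves t[:k] and t[k:2k] are equal.  (Does not mutate its argument.)
--     t = sample[:-1]
--     if len(t) % 2 == 1:
--         t = t[:-1]
--     best = 0
--     for k in range(1, len(t) // 2 + 1):
--         if t[:k] == t[k:2 * k]:
--             best = 2 * k
--     return best
-- ===== Notes on version B (the rewrite author's own statement) =====
-- stated objective: alternative
-- what changed: A is a stateful restart machine that compares halves back-to-front with two moving indices and truncates the working list by two on every mismatch; B never truncates anything: it makes one ascending pass over the candidate half-lengths k, tests prefix-half equality by slice comparison t[:k]==t[k:2k], and keeps the largest success; B also does not mutate the caller's list.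
import Mathlib
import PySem

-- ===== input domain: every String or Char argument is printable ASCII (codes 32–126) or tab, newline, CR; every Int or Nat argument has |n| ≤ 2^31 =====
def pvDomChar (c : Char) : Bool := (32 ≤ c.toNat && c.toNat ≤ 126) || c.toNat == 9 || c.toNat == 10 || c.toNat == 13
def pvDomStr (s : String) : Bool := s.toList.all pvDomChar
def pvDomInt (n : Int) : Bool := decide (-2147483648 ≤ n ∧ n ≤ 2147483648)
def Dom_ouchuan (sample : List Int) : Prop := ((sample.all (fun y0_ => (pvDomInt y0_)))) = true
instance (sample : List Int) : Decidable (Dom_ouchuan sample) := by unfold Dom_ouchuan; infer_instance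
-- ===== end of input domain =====

-- B replaces A's truncate-and-restart index machine by one ascending pass over the
-- candidate half-lengths keeping the largest success (objective: alternative, same cost).
-- A pops from its argument in place; this file proves RETURN-VALUE equivalence only
-- (B does not mutate the caller's list).

-- ===== PORT A =====
-- the while loop's matching phase ('while start >= 0 and the pair matches'): the Nat
-- argument carries start + 1, so 'n + 1' means start = n ≥ 0 and '0' means start < 0
def ouchuanScanN (s : List Int) : Nat → Int → Bool
  | 0, _ => true
  | n + 1, e =>
    match PySem.List.pyGet? s (n : Int), PySem.List.pyGet? s e with
    | some a, some b => if a = b then ouchuanScanN s n (e - 1) else false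
    | _, _ => false   -- IndexError: unreachable on the trimmed even-length lists A builds

def ouchuanScan (s : List Int) (start e : Int) : Bool := ouchuanScanN s (start + 1).toNat e

-- the while loop: a mismatch truncates sample to sample[:-2] and restarts the scan;
-- the fuel is a totality guard only (each pass removes two elements, so it is never exhausted)
def ouchuanLoopN : Nat → List Int → Int
  | 0, s => (s.length : Int)
  | fuel + 1, s =>
    if ouchuanScan s (((s.length / 2 : Nat) : Int) - 1) ((s.length : Int) - 1) then (s.length : Int)
    else ouchuanLoopN fuel (PySem.List.slice s none (some (-2)))

def ouchuan (sample : List Int) : Int :=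
  -- sample.pop() (IndexError on []: excluded by Pre_), then a second pop if the length is odd
  let t := if sample.dropLast.length % 2 = 1 then sample.dropLast.dropLast else sample.dropLast
  ouchuanLoopN (t.length / 2 + 1) t

-- ===== PORT B =====
-- for k in range(1, len(t)//2 + 1): if t[:k] == t[k:2*k]: best = 2*k
def ouchuanBest (t : List Int) : Int :=
  (PySem.List.pyRange 1 (((t.length / 2 : Nat) : Int) + 1) 1).foldl
    (fun best k =>
      if PySem.List.slice t none (some k) = PySem.List.slice t (some k) (some (2 * k))
      then 2 * k else best) 0

def ouchuan_alt (sample : List Int) : Int :=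
  -- t = sample[:-1]; if len(t) % 2: t = t[:-1]
  ouchuanBest
    (if sample.dropLast.length % 2 = 1 then sample.dropLast.dropLast else sample.dropLast)

-- ===== PRECONDITION & SPEC =====
-- Pre_ excludes only the empty list, on which A's first pop() raises IndexError (B returns 0 there).
def Pre_ouchuan (sample : List Int) : Prop := sample ≠ []
instance (sample : List Int) : Decidable (Pre_ouchuan sample) := by unfold Pre_ouchuan; infer_instance
def pvWitness_ouchuan : List Int := [1, 2, 1, 2, 0]

def Spec_ouchuan (sample : List Int) (out : Int) : Prop := out = ouchuan_alt sample
instance (sample : List Int) (out : Int) : Decidable (Spec_ouchuan sample out) := by unfold Spec_ouchuan; infer_instance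

-- ===== CLAIM (what is proved, stated in full; the proofs are below) =====
def Claim_equal_ouchuan : Prop := ∀ (sample : List Int), Dom_ouchuan sample → Pre_ouchuan sample → Spec_ouchuan sample (ouchuan sample)

-- ===== LEMMAS AND PROOFS =====

-- reference value: largest 2k with k ≤ n and t[:k] = t[k:2k], computed top-down
def pvF (t : List Int) : Nat → Int
  | 0 => 0
  | n + 1 => if t.take (n+1) = (t.drop (n+1)).take (n+1) then 2 * ((n : Int) + 1) else pvF t n

-- B's fold computes pvF
theorem best_eq_pvF (t : List Int) (m : Nat) :
    (PySem.List.pyRange 1 ((m : Int) + 1) 1).foldl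
      (fun best k =>
        if PySem.List.slice t none (some k) = PySem.List.slice t (some k) (some (2 * k))
        then 2 * k else best) 0 = pvF t m := by
  induction m with
  | zero =>
    rw [PySem.List.pyRange_one_eq_nil (by norm_num)]
    rfl
  | succ n ih =>
    have hcast : ((n + 1 : Nat) : Int) + 1 = ((n : Int) + 1) + 1 := by push_cast; ring
    rw [hcast, PySem.List.pyRange_one_succ_right (by omega), List.foldl_append, ih]
    have h1 : PySem.List.slice t none (some ((n : Int) + 1)) = t.take (n + 1) := by
      have := PySem.List.slice_to_natCast t (n + 1)
      push_cast at this
      exact this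
    have h2 : PySem.List.slice t (some ((n : Int) + 1)) (some (2 * ((n : Int) + 1)))
        = (t.drop (n + 1)).take (n + 1) := by
      have := PySem.List.slice_natCast_add t (n + 1) (n + 1)
      push_cast at this
      rw [← this]
      ring_nf
    simp only [List.foldl_cons, List.foldl_nil, h1, h2, pvF]

-- A's matching phase succeeds iff all pairs below the current index match
theorem scan_iff (s : List Int) (m : Nat) (hlen : s.length = 2 * m) :
    ∀ j : Nat, j ≤ m →
      (ouchuanScanN s j ((j : Int) + (m : Int) - 1) = true
        ↔ ∀ i : Nat, i < j → s[i]? = s[i + m]?) := by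
  intro j
  induction j with
  | zero =>
    intro _
    simp [ouchuanScanN]
  | succ j ih =>
    intro hj
    have hj1 : j < s.length := by omega
    have hj2 : j + m < s.length := by omega
    have gp : ∀ k : Nat, (hk : k < s.length) → PySem.List.pyGet? s (k : Int) = some s[k] := by
      intro k hk; simp [pysem, hk]
    rw [ouchuanScanN]
    have g2 : PySem.List.pyGet? s (((j + 1 : Nat) : Int) + (m : Int) - 1) = some s[j + m] := by
      have e2 : ((j + 1 : Nat) : Int) + (m : Int) - 1 = ((j + m : Nat) : Int) := by push_cast; ring
      rw [e2]; exact gp (j + m) hj2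
    rw [gp j hj1, g2]
    have e3 : ((j + 1 : Nat) : Int) + (m : Int) - 1 - 1 = ((j : Nat) : Int) + (m : Int) - 1 := by
      push_cast; ring
    simp only [e3]
    by_cases heq : s[j] = s[j + m]
    · rw [if_pos heq, ih (by omega)]
      constructor
      · intro hall i hi
        rcases Nat.lt_succ_iff_lt_or_eq.mp hi with h | h
        · exact hall i h
        · subst h
          rw [List.getElem?_eq_getElem (by omega), List.getElem?_eq_getElem (by omega)]
          exact congrArg some heq
      · intro hall i hi
        exact hall i (by omega)
    · rw [if_neg heq]
      constructor
      · intro hfalse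
        exact (Bool.false_ne_true hfalse).elim
      · intro hall
        have := hall j (by omega)
        rw [List.getElem?_eq_getElem hj1, List.getElem?_eq_getElem hj2] at this
        exact absurd (Option.some.inj this) heq

-- the pairwise condition is equality of the two halves
theorem halves_iff (s : List Int) (m : Nat) (hlen : s.length = 2 * m) :
    (∀ i : Nat, i < m → s[i]? = s[i + m]?) ↔ s.take m = s.drop m := by
  constructor
  · intro h
    apply List.ext_getElem?
    intro i
    by_cases hi : i < m
    · rw [List.getElem?_take_of_lt hi, List.getElem?_drop]
      rw [h i hi, Nat.add_comm]
    · rw [List.getElem?_eq_none (by simp [List.length_take]; omega),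
          List.getElem?_eq_none (by simp [List.length_drop]; omega)]
  · intro h i hi
    have := congrArg (fun l => l[i]?) h
    simp only at this
    rw [List.getElem?_take_of_lt hi, List.getElem?_drop] at this
    rw [this, Nat.add_comm]

-- A's loop on the prefix of length 2n computes pvF (any sufficient fuel)
theorem loop_take (t : List Int) : ∀ (n : Nat), 2 * n ≤ t.length → ∀ (f : Nat), n < f →
    ouchuanLoopN f (t.take (2 * n)) = pvF t n := by
  intro n
  induction n with
  | zero =>
    intro _ f hf
    obtain ⟨f', rfl⟩ : ∃ f', f = f' + 1 := ⟨f - 1, by omega⟩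
    rw [ouchuanLoopN]
    rw [if_pos]
    · simp [pvF]
    · simp [ouchuanScan, ouchuanScanN]
  | succ n ih =>
    intro hle f hf
    obtain ⟨f', rfl⟩ : ∃ f', f = f' + 1 := ⟨f - 1, by omega⟩
    have hslen : (t.take (2 * (n + 1))).length = 2 * (n + 1) := by
      simp [List.length_take]; omega
    have hscan := scan_iff (t.take (2 * (n + 1))) (n + 1) hslen (n + 1) le_rfl
    have hhalf := halves_iff (t.take (2 * (n + 1))) (n + 1) hslen
    have htake : (t.take (2 * (n + 1))).take (n + 1) = t.take (n + 1) := by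
      rw [List.take_take]; congr 1; omega
    have hdrop : (t.take (2 * (n + 1))).drop (n + 1) = (t.drop (n + 1)).take (n + 1) := by
      rw [List.drop_take]; congr 1; omega
    rw [htake, hdrop] at hhalf
    rw [ouchuanLoopN]
    have ha : (((((t.take (2 * (n + 1))).length / 2 : Nat)) : Int) - 1 + 1).toNat = n + 1 := by
      omega
    have hb : (((t.take (2 * (n + 1))).length : Nat) : Int) - 1
        = ((n + 1 : Nat) : Int) + ((n + 1 : Nat) : Int) - 1 := by
      omega
    have hscanarg : ouchuanScan (t.take (2 * (n + 1)))
        ((((t.take (2 * (n + 1))).length / 2 : Nat) : Int) - 1)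
        ((((t.take (2 * (n + 1))).length : Nat) : Int) - 1)
        = ouchuanScanN (t.take (2 * (n + 1))) (n + 1)
            (((n + 1 : Nat) : Int) + ((n + 1 : Nat) : Int) - 1) := by
      rw [ouchuanScan, ha, hb]
    rw [hscanarg]
    by_cases hc : t.take (n + 1) = (t.drop (n + 1)).take (n + 1)
    · rw [if_pos (hscan.mpr (hhalf.mpr hc)), hslen, pvF, if_pos hc]
      push_cast; ring
    · rw [if_neg (fun h => hc (hhalf.mp (hscan.mp h)))]
      rw [PySem.List.slice_to_neg_ofNat _ 2 (by omega), hslen]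
      have hred : (t.take (2 * (n + 1))).take (2 * (n + 1) - 2) = t.take (2 * n) := by
        rw [List.take_take]; congr 1; omega
      rw [hred, ih (by omega) f' (by omega), pvF, if_neg hc]

-- on an even-length list the two sides agree
theorem loop_eq_best (t : List Int) (he : t.length % 2 = 0) :
    ouchuanLoopN (t.length / 2 + 1) t = ouchuanBest t := by
  have h2 : 2 * (t.length / 2) = t.length := by omega
  have := loop_take t (t.length / 2) (by omega) (t.length / 2 + 1) (by omega)
  rw [h2, List.take_length] at this
  rw [this]
  unfold ouchuanBest
  rw [best_eq_pvF]

-- the trimmed list has even length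
theorem trim_even (sample : List Int) :
    (if sample.dropLast.length % 2 = 1 then sample.dropLast.dropLast else sample.dropLast).length % 2 = 0 := by
  by_cases h : sample.dropLast.length % 2 = 1
  · rw [if_pos h]
    simp only [List.length_dropLast] at h ⊢
    omega
  · rw [if_neg h]
    omega

-- ===== VERDICT (by name: the statement is the Claim_ definition above) =====
theorem ouchuan_spec : Claim_equal_ouchuan := by
  intro sample _ _
  show ouchuan sample = ouchuan_alt sample
  exact loop_eq_best _ (trim_even sample)
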